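-- pv_equiv track=rewrite | github.com/prakruthishekar/Competitive-Coding | Cisco/Find smallest non twin.py | funcTwins
-- ===== SOURCE A (Python) =====
-- def funcTwins(inputArr):
-- 	# Write your code here
-- 	freq = {}
--
-- 	for num in inputArr:
-- 		freq[num] = freq.get(num,0) + 1
-- 	not_twin = -1
-- 	for num,f in freq.items():
-- 		if f == 1 and (not_twin == -1 or num < not_twin):
-- 			not_twin = num
--
-- 	return not_twin
-- ===== SOURCE B (Python) =====
-- def funcTwins(inputArr):
--     # Sort, then scan once: the first element with no equal neighbour is the
--     # smallest value that occurs exactly once.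
--     s = sorted(inputArr)
--     n = len(s)
--     for i in range(n):
--         x = s[i]
--         if (i == 0 or s[i - 1] != x) and (i + 1 == n or s[i + 1] != x):
--             return x
--     return -1
-- ===== Notes on version B (the rewrite author's own statement) =====
-- stated objective: alternative
-- what changed: Replaces the dict frequency count plus sentinel-tracking minimum loop by sort-then-scan: in the sorted array the first element with no equal neighbour is the smallest singleton; this also removes A's sentinel bug where an actual singleton -1 resets the running minimum.
-- intended difference: On inputs where -1 occurs exactly once, every value occurring exactly once is >= -1, and some value > -1 occurring exactly once appears after the -1, A returns the smallest such later singleton (because the actual singleton -1 is confused with the -1 'not found' sentinel and is then overwritten), while B returns -1, the true smallest value occurring exactly once. — e.g. on funcTwins([-1, 5]): A returns 5, B returns -1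
import Mathlib
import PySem

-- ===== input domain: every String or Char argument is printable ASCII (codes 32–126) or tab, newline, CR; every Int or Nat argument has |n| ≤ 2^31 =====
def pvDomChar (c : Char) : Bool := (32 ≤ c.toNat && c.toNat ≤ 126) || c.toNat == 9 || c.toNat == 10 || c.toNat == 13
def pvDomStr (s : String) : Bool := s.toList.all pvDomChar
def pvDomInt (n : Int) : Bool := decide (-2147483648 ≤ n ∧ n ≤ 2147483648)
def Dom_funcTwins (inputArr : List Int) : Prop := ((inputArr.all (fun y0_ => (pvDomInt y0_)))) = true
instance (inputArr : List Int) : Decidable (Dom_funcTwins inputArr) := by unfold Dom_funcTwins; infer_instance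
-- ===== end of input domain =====

-- B replaces A's dict frequency count + sentinel-minimum loop by sort-then-scan (first element of
-- the sorted array with no equal neighbour); B also returns the intended value (-1, the smallest
-- singleton) where A's -1 sentinel is clobbered by an actual singleton -1 (see D_funcTwins).

-- ===== PORT A =====
def funcTwins (inputArr : List Int) : Int :=
  let freq := inputArr.foldl (fun d num => d.insert num (d.getD num 0 + 1))
    (PySem.Dict.empty : PySem.Dict Int Int)
  freq.items.foldl
    (fun not_twin p => if p.2 = 1 ∧ (not_twin = -1 ∨ p.1 < not_twin) then p.1 else not_twin) (-1)

-- ===== PORT B =====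
-- the scan over the sorted list: prev = s[i-1] (none at i = 0), rest.head? = s[i+1] (none at the end)
def funcTwinsScan : Option Int → List Int → Int
  | _, [] => -1
  | prev, x :: rest =>
      if prev ≠ some x ∧ rest.head? ≠ some x then x else funcTwinsScan (some x) rest

def funcTwins_alt (inputArr : List Int) : Int :=
  funcTwinsScan none (PySem.List.sorted inputArr (fun y => y) false)

-- ===== PRECONDITION & SPEC =====
-- On inputs where -1 occurs exactly once, every value occurring exactly once is ≥ -1, and some
-- value > -1 occurring exactly once appears after the -1, A returns the smallest such later
-- singleton (its actual singleton -1 is confused with the -1 'not found' sentinel and then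
-- overwritten), while B returns -1, the true smallest value occurring exactly once.
def D_funcTwins (inputArr : List Int) : Prop :=
  inputArr.count (-1) = 1 ∧ (∀ x ∈ inputArr, inputArr.count x = 1 → -1 ≤ x) ∧
  ∃ x ∈ inputArr.drop (inputArr.idxOf (-1) + 1), inputArr.count x = 1 ∧ -1 < x
instance (inputArr : List Int) : Decidable (D_funcTwins inputArr) := by
  unfold D_funcTwins; infer_instance

def Spec_funcTwins (inputArr : List Int) (out : Int) : Prop :=
  ¬ D_funcTwins inputArr → out = funcTwins_alt inputArr
instance (inputArr : List Int) (out : Int) : Decidable (Spec_funcTwins inputArr out) := by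
  unfold Spec_funcTwins; infer_instance

def pvDiffWitness_funcTwins : List Int := [-1, 5]
def pvDiffWitnessOut_funcTwins : Int × Int := (5, -1)

-- ===== CLAIM (what is proved, stated in full; the proofs are below) =====
def Claim_unchanged_funcTwins : Prop :=
  ∀ (inputArr : List Int), Dom_funcTwins inputArr → Spec_funcTwins inputArr (funcTwins inputArr)
def Claim_changed_funcTwins : Prop :=
  Dom_funcTwins (pvDiffWitness_funcTwins) ∧ D_funcTwins (pvDiffWitness_funcTwins) ∧
  funcTwins (pvDiffWitness_funcTwins) = pvDiffWitnessOut_funcTwins.1 ∧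
  funcTwins_alt (pvDiffWitness_funcTwins) = pvDiffWitnessOut_funcTwins.2 ∧
  pvDiffWitnessOut_funcTwins.1 ≠ pvDiffWitnessOut_funcTwins.2
def Claim_exact_funcTwins : Prop :=
  ∀ (inputArr : List Int), Dom_funcTwins inputArr → D_funcTwins inputArr →
    funcTwins inputArr ≠ funcTwins_alt inputArr

-- ===== LEMMAS AND PROOFS =====

-- r is "the answer intended for xs": -1 if nothing occurs exactly once, else the least singleton
def pvIsRef (xs : List Int) (r : Int) : Prop :=
  ((∀ x ∈ xs, xs.count x ≠ 1) ∧ r = -1) ∨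
  (xs.count r = 1 ∧ ∀ x ∈ xs, xs.count x = 1 → r ≤ x)

lemma pvIsRef_unique {xs : List Int} {r r' : Int} (h : pvIsRef xs r) (h' : pvIsRef xs r') :
    r = r' := by
  rcases h with ⟨hno, rfl⟩ | ⟨hc, hmin⟩ <;> rcases h' with ⟨hno', rfl⟩ | ⟨hc', hmin'⟩
  · rfl
  · exact absurd hc' (hno _ (List.count_pos_iff.mp (by omega)))
  · exact absurd hc (hno' _ (List.count_pos_iff.mp (by omega)))
  · exact le_antisymm (hmin _ (List.count_pos_iff.mp (by omega)) hc')
      (hmin' _ (List.count_pos_iff.mp (by omega)) hc)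

lemma pvIsRef_perm {s xs : List Int} (hp : s.Perm xs) {r : Int} (h : pvIsRef s r) :
    pvIsRef xs r := by
  rcases h with ⟨hno, rfl⟩ | ⟨hc, hmin⟩
  · exact Or.inl ⟨fun x hx => by rw [← hp.count_eq]; exact hno x (hp.mem_iff.mpr hx), rfl⟩
  · exact Or.inr ⟨by rw [← hp.count_eq]; exact hc,
      fun x hx hcx => hmin x (hp.mem_iff.mpr hx) (by rw [hp.count_eq]; exact hcx)⟩

-- ---------- B side ----------

lemma funcTwinsScan_prev_irrel (t : List Int) (x : Int) (hx : t.head? ≠ some x) :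
    funcTwinsScan (some x) t = funcTwinsScan none t := by
  cases t with
  | nil => rfl
  | cons y t' =>
      simp only [List.head?_cons, ne_eq, Option.some.injEq] at hx
      by_cases hht : t'.head? = some y
      · simp [funcTwinsScan, hht]
      · simp [funcTwinsScan, hht, Ne.symm hx]

lemma funcTwinsScan_run (x : Int) (t : List Int) (hle : ∀ y ∈ t, x ≤ y) :
    funcTwinsScan (some x) t = funcTwinsScan none (t.dropWhile (fun y => y == x)) := by
  induction t with
  | nil => rfl
  | cons y t' ih =>
      by_cases hxy : y = x
      · rw [List.dropWhile_cons_of_pos (by simp [hxy])]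
        rw [show funcTwinsScan (some x) (y :: t') = funcTwinsScan (some y) t' by
          simp [funcTwinsScan, hxy]]
        rw [hxy]
        exact ih (fun z hz => hle z (List.mem_cons_of_mem _ hz))
      · rw [List.dropWhile_cons_of_neg (by simpa using hxy)]
        exact funcTwinsScan_prev_irrel (y :: t') x (by simpa using hxy)

lemma sorted_head_notMem {x : Int} {t : List Int} (h : (x :: t).Pairwise (· ≤ ·))
    (hh : t.head? ≠ some x) : x ∉ t := by
  intro hx
  cases t with
  | nil => simp at hx
  | cons y t' =>
      simp only [List.head?_cons, ne_eq, Option.some.injEq] at hh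
      rcases List.mem_cons.mp hx with rfl | hx'
      · exact hh rfl
      · have h1 : x ≤ y := (List.pairwise_cons.mp h).1 y (List.mem_cons_self)
        have h2 : y ≤ x := ((List.pairwise_cons.mp (List.pairwise_cons.mp h).2).1) x hx'
        exact hh (le_antisymm h2 h1)

lemma notMem_dropWhile_beq (x : Int) (t : List Int) (h : t.Pairwise (· ≤ ·))
    (hle : ∀ y ∈ t, x ≤ y) : x ∉ t.dropWhile (fun y => y == x) := by
  induction t with
  | nil => simp
  | cons y t' ih =>
      rw [List.pairwise_cons] at h
      by_cases hxy : y = x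
      · rw [List.dropWhile_cons_of_pos (by simp [hxy])]
        exact ih h.2 (fun z hz => hle z (List.mem_cons_of_mem _ hz))
      · rw [List.dropWhile_cons_of_neg (by simpa using hxy)]
        intro hx
        rcases List.mem_cons.mp hx with rfl | hx'
        · exact hxy rfl
        · have h1 : x ≤ y := hle y List.mem_cons_self
          have h2 : y ≤ x := h.1 x hx'
          exact hxy (le_antisymm h2 h1)

lemma count_dropWhile_beq_of_ne (x z : Int) (t : List Int) (hz : z ≠ x) :
    (t.dropWhile (fun y => y == x)).count z = t.count z := by
  induction t with
  | nil => rfl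
  | cons y t' ih =>
      by_cases hxy : y = x
      · rw [List.dropWhile_cons_of_pos (by simp [hxy]), ih]
        simp [hxy, Ne.symm hz]
      · rw [List.dropWhile_cons_of_neg (by simpa using hxy)]

lemma mem_dropWhile_beq_of_ne {x z : Int} {t : List Int} (hz : z ≠ x) (hm : z ∈ t) :
    z ∈ t.dropWhile (fun y => y == x) := by
  induction t with
  | nil => simp at hm
  | cons y t' ih =>
      by_cases hxy : y = x
      · rw [List.dropWhile_cons_of_pos (by simp [hxy])]
        refine ih ?_
        rcases List.mem_cons.mp hm with rfl | h
        · exact absurd hxy hz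
        · exact h
      · rw [List.dropWhile_cons_of_neg (by simpa using hxy)]; exact hm

lemma funcTwinsScan_isRef_aux : ∀ (n : Nat) (s : List Int), s.length = n → s.Pairwise (· ≤ ·) →
    pvIsRef s (funcTwinsScan none s) := by
  intro n
  induction n using Nat.strong_induction_on with
  | _ n ih =>
    intro s hn hs
    cases s with
    | nil => exact Or.inl ⟨by simp, rfl⟩
    | cons x t =>
      by_cases hh : t.head? = some x
      · -- run of x of length ≥ 2: skip the whole run
        cases t with
        | nil => simp at hh
        | cons y t' =>
          simp only [List.head?_cons, Option.some.injEq] at hh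
          subst y
          have hle : ∀ z ∈ x :: t', x ≤ z := by
            intro z hz
            rcases List.mem_cons.mp hz with rfl | hz'
            · exact le_refl z
            · exact (List.pairwise_cons.mp hs).1 z (List.mem_cons_of_mem _ hz')
          have hstep : funcTwinsScan none (x :: x :: t') =
              funcTwinsScan none ((x :: t').dropWhile (fun y => y == x)) := by
            rw [show funcTwinsScan none (x :: x :: t') = funcTwinsScan (some x) (x :: t') by
              simp [funcTwinsScan]]
            exact funcTwinsScan_run x (x :: t') hle
          set w := (x :: t').dropWhile (fun y => y == x) with hw
          have hsub : w.Sublist (x :: t') := List.dropWhile_sublist _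
          have hwlen : w.length < n := by
            have := hsub.length_le
            simp only [List.length_cons] at hn
            have hd : w.length ≤ t'.length := by
              rw [hw, List.dropWhile_cons_of_pos (by simp)]
              exact (List.dropWhile_sublist _).length_le
            omega
          have hwpw : w.Pairwise (· ≤ ·) :=
            ((List.pairwise_cons.mp hs).2).sublist (by
              rw [hw, List.dropWhile_cons_of_pos (by simp)]
              exact (List.dropWhile_sublist _).trans (List.sublist_cons_self _ _))
          have href := ih w.length hwlen w rfl hwpw
          have hxw : x ∉ w := by
            rw [hw]
            exact notMem_dropWhile_beq x (x :: t') (List.pairwise_cons.mp hs).2 hle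
          have hcnt : ∀ z, z ≠ x → (x :: x :: t').count z = w.count z := by
            intro z hz
            rw [hw, count_dropWhile_beq_of_ne x z (x :: t') hz]
            simp [Ne.symm hz]
          have hx2 : (x :: x :: t').count x ≠ 1 := by
            simp
          rw [hstep]
          rcases href with ⟨hno, he⟩ | ⟨hc, hmin⟩
          · refine Or.inl ⟨?_, he⟩
            intro z hz
            by_cases hzx : z = x
            · subst hzx; exact hx2
            · intro hc1
              have hzw : z ∈ w := by
                rw [hw]
                refine mem_dropWhile_beq_of_ne hzx ?_
                rcases List.mem_cons.mp hz with rfl | h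
                · exact absurd rfl hzx
                · exact h
              exact hno z hzw ((hcnt z hzx) ▸ hc1)
          · refine Or.inr ⟨?_, ?_⟩
            · have hrx : funcTwinsScan none w ≠ x := by
                intro he
                have : funcTwinsScan none w ∈ w :=
                  List.count_pos_iff.mp (by omega)
                exact hxw (he ▸ this)
              rw [hcnt _ hrx]; exact hc
            · intro z hz hc1
              by_cases hzx : z = x
              · subst hzx; exact absurd hc1 hx2
              · have hzw : z ∈ w := by
                  rw [hw]
                  refine mem_dropWhile_beq_of_ne hzx ?_
                  rcases List.mem_cons.mp hz with rfl | h
                  · exact absurd rfl hzx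
                  · exact h
                exact hmin z hzw ((hcnt z hzx) ▸ hc1)
      · -- the head is a singleton: return it
        have hxt : x ∉ t := sorted_head_notMem hs hh
        have : funcTwinsScan none (x :: t) = x := by
          simp [funcTwinsScan, hh]
        rw [this]
        refine Or.inr ⟨by simp [List.count_cons_self, List.count_eq_zero_of_not_mem hxt], ?_⟩
        intro z hz _
        rcases List.mem_cons.mp hz with rfl | hz'
        · exact le_refl z
        · exact (List.pairwise_cons.mp hs).1 z hz'

lemma funcTwins_alt_isRef (xs : List Int) : pvIsRef xs (funcTwins_alt xs) := by
  have hperm := PySem.List.sorted_perm xs (fun y => y) false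
  have hpw := PySem.List.sorted_pairwise xs (fun y => y)
  exact pvIsRef_perm hperm (funcTwinsScan_isRef_aux _ _ rfl hpw)

-- ---------- A side ----------

def pvStep (t k : Int) : Int := if t = -1 ∨ k < t then k else t

def pvSing (xs : List Int) : List Int :=
  (PySem.Set.ofList xs).filter (fun k => xs.count k == 1)

lemma funcTwins_eq_foldA (xs : List Int) :
    funcTwins xs = (pvSing xs).foldl pvStep (-1) := by
  show (List.foldl (fun d num => d.insert num (d.getD num 0 + 1))
      (PySem.Dict.empty : PySem.Dict Int Int) xs).items.foldl
    (fun not_twin p => if p.2 = 1 ∧ (not_twin = -1 ∨ p.1 < not_twin) then p.1 else not_twin) (-1) = _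
  rw [PySem.Dict.foldl_insert_getD_add_one_eq_counter (κ := Int) xs, PySem.Dict.items_counter, List.foldl_map]
  unfold pvSing
  rw [← PySem.List.foldl_if_eq_foldl_filter (fun k => xs.count k == 1) pvStep]
  apply PySem.List.foldl_congr_mem
  intro acc k _
  by_cases h : xs.count k = 1
  · simp [h, pvStep]
  · have h' : ¬ ((xs.count k : Int) = 1) := by exact_mod_cast h
    simp [h, h']

lemma foldA_mem (s : List Int) : ∀ t : Int, s.foldl pvStep t = t ∨ s.foldl pvStep t ∈ s := by
  induction s with
  | nil => exact fun t => Or.inl rfl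
  | cons k s' ih =>
      intro t
      rw [List.foldl_cons]
      rcases ih (pvStep t k) with h | h
      · rw [h]
        unfold pvStep
        split_ifs
        · exact Or.inr List.mem_cons_self
        · exact Or.inl rfl
      · exact Or.inr (List.mem_cons_of_mem _ h)

lemma foldA_stay (s : List Int) (t : Int) (ht : t ≠ -1) (hle : ∀ x ∈ s, t ≤ x) :
    s.foldl pvStep t = t := by
  induction s with
  | nil => rfl
  | cons k s' ih =>
      have hk : pvStep t k = t := by
        unfold pvStep
        have := hle k List.mem_cons_self
        split_ifs with h
        · rcases h with h | h
          · exact absurd h ht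
          · omega
        · rfl
      rw [List.foldl_cons, hk]
      exact ih (fun x hx => hle x (List.mem_cons_of_mem _ hx))

lemma foldA_min (s : List Int) (t : Int) (ht : t ≠ -1) (hs : ∀ x ∈ s, x ≠ -1) :
    s.foldl pvStep t = s.foldl min t := by
  induction s generalizing t with
  | nil => rfl
  | cons k s' ih =>
      have hk : pvStep t k = min t k := by
        unfold pvStep
        split_ifs with h
        · rcases h with h | h
          · exact absurd h ht
          · simp [min_def]; omega
        · simp [min_def]; omega
      rw [List.foldl_cons, List.foldl_cons, hk]
      refine ih (min t k) ?_ (fun x hx => hs x (List.mem_cons_of_mem _ hx))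
      have hkne : k ≠ -1 := hs k List.mem_cons_self
      rcases min_choice t k with h | h <;> rw [h] <;> assumption

lemma mem_pvSing {xs : List Int} {x : Int} : x ∈ pvSing xs ↔ x ∈ xs ∧ xs.count x = 1 := by
  unfold pvSing
  rw [List.mem_filter, PySem.Set.mem_ofList]
  simp

-- a fold of PySem.Set.add only appends new elements at the back
lemma foldl_add_decomp : ∀ (q s : List Int), ∃ r, q.foldl PySem.Set.add s = s ++ r ∧
    (∀ x ∈ r, x ∈ q) ∧ (∀ x ∈ q, x ∈ s ∨ x ∈ r) := by
  intro q
  induction q with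
  | nil => exact fun s => ⟨[], by simp⟩
  | cons y q' ih =>
      intro s
      by_cases hy : y ∈ s
      · obtain ⟨r, hr, hr1, hr2⟩ := ih s
        refine ⟨r, ?_, ?_, ?_⟩
        · rw [List.foldl_cons, show PySem.Set.add s y = s by simp [PySem.Set.add, hy]]
          exact hr
        · exact fun x hx => List.mem_cons_of_mem _ (hr1 x hx)
        · intro x hx
          rcases List.mem_cons.mp hx with rfl | hx'
          · exact Or.inl hy
          · exact hr2 x hx'
      · obtain ⟨r, hr, hr1, hr2⟩ := ih (s ++ [y])
        refine ⟨y :: r, ?_, ?_, ?_⟩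
        · rw [List.foldl_cons, show PySem.Set.add s y = s ++ [y] by simp [PySem.Set.add, hy], hr]
          simp
        · intro x hx
          rcases List.mem_cons.mp hx with rfl | hx'
          · exact List.mem_cons_self
          · exact List.mem_cons_of_mem _ (hr1 x hx')
        · intro x hx
          rcases List.mem_cons.mp hx with rfl | hx'
          · exact Or.inr List.mem_cons_self
          · rcases hr2 x hx' with h | h
            · rcases List.mem_append.mp h with h' | h'
              · exact Or.inl h'
              · exact Or.inr (by simpa using Or.inl (List.mem_singleton.mp h'))
            · exact Or.inr (List.mem_cons_of_mem _ h)

-- first-singleton decomposition of pvSing when -1 occurs exactly once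
lemma pvSing_split {xs : List Int} (h1 : xs.count (-1) = 1) :
    ∃ u v : List Int, pvSing xs = u ++ -1 :: v ∧ (-1 : Int) ∉ u ∧ (-1 : Int) ∉ v ∧
      (∀ x ∈ u, x ∈ xs ∧ xs.count x = 1) ∧ (∀ x ∈ v, x ∈ xs ∧ xs.count x = 1) ∧
      ((-1 : Int) ∉ xs.drop (xs.idxOf (-1) + 1)) ∧
      (v ≠ [] ↔ ∃ x ∈ xs.drop (xs.idxOf (-1) + 1), xs.count x = 1) := by
  have hm : (-1 : Int) ∈ xs := List.count_pos_iff.mp (by omega)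
  have hi : xs.idxOf (-1) < xs.length := List.idxOf_lt_length_of_mem hm
  set i := xs.idxOf (-1) with hidef
  set p := xs.take i with hp
  set q := xs.drop (i + 1) with hq
  have hxs : xs = p ++ -1 :: q := by
    have hg : xs[i] = -1 := List.getElem_idxOf hi
    rw [hp, hq, ← hg, List.getElem_cons_drop hi, List.take_append_drop]
  have hpn : (-1 : Int) ∉ p := by
    rw [hp]
    intro hc
    have := (List.mem_take_iff_idxOf_lt hm).mp hc
    omega
  have hqn : (-1 : Int) ∉ q := by
    intro hc
    have : xs.count (-1) ≥ 2 := by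
      rw [hxs, List.count_append, List.count_cons_self]
      have : q.count (-1) ≥ 1 := List.count_pos_iff.mpr hc
      omega
    omega
  -- Set.ofList xs = (Set.ofList p ++ [-1]) ++ r with r drawn from q
  have hofp : (-1 : Int) ∉ PySem.Set.ofList p := fun hc => hpn ((PySem.Set.mem_ofList p _).mp hc)
  obtain ⟨r, hr, hr1, hr2⟩ := foldl_add_decomp q (PySem.Set.ofList p ++ [-1])
  have hof : PySem.Set.ofList xs = (PySem.Set.ofList p ++ [-1]) ++ r := by
    rw [hxs, PySem.Set.ofList_eq_foldl, List.foldl_append, List.foldl_cons,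
      ← PySem.Set.ofList_eq_foldl,
      show PySem.Set.add (PySem.Set.ofList p) (-1) = PySem.Set.ofList p ++ [-1] by
        simp [PySem.Set.add, hofp]]
    exact hr
  refine ⟨(PySem.Set.ofList p).filter (fun k => xs.count k == 1),
          r.filter (fun k => xs.count k == 1), ?_, ?_, ?_, ?_, ?_, hqn, ?_⟩
  · unfold pvSing
    rw [hof, List.filter_append, List.filter_append]
    have : List.filter (fun k => xs.count k == 1) [-1] = [-1] := by simp [h1]
    rw [this, List.append_assoc]
    rfl
  · intro hc; exact hofp (List.mem_of_mem_filter hc)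
  · intro hc; exact hqn (hr1 _ (List.mem_of_mem_filter hc))
  · intro x hx
    have h1x := List.mem_of_mem_filter hx
    have h2x := List.of_mem_filter hx
    exact ⟨by rw [hxs]; exact List.mem_append.mpr (Or.inl ((PySem.Set.mem_ofList _ _).mp h1x)),
      by simpa using h2x⟩
  · intro x hx
    have h1x := hr1 _ (List.mem_of_mem_filter hx)
    have h2x := List.of_mem_filter hx
    exact ⟨by rw [hxs]; exact List.mem_append.mpr (Or.inr (List.mem_cons_of_mem _ h1x)),
      by simpa using h2x⟩
  · constructor
    · intro hne
      obtain ⟨x, hx⟩ := List.exists_mem_of_ne_nil _ hne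
      exact ⟨x, hr1 _ (List.mem_of_mem_filter hx), by simpa using List.of_mem_filter hx⟩
    · rintro ⟨x, hxq, hxc⟩
      have hxne : x ≠ -1 := fun he => hqn (he ▸ hxq)
      have hxp : x ∉ p := by
        intro hc
        have l1 : p.count x ≥ 1 := List.count_pos_iff.mpr hc
        have l2 : q.count x ≥ 1 := List.count_pos_iff.mpr hxq
        have hxx : xs.count x = p.count x + (((-1 : Int) :: q).count x) := by
          rw [hxs, List.count_append]
        have hcq : ((-1 : Int) :: q).count x = q.count x := by
          simp [Ne.symm hxne]
        omega
      have hxr : x ∈ r := by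
        rcases hr2 x hxq with h | h
        · rcases List.mem_append.mp h with h' | h'
          · exact absurd ((PySem.Set.mem_ofList _ _).mp h') hxp
          · exact absurd (List.mem_singleton.mp h') hxne
        · exact h
      exact List.ne_nil_of_mem (List.mem_filter.mpr ⟨hxr, by simpa using hxc⟩)

-- generic run of A's fold over a nonempty singleton list whose elements avoid -1
lemma pvStep_eq_of {t k : Int} (h : t = -1 ∨ k ≤ t) : pvStep t k = k := by
  unfold pvStep
  split_ifs with hif
  · rfl
  · push Not at hif
    omega

lemma foldA_cons_min {h : Int} {rest : List Int} (hh : h ≠ -1) (hr : ∀ x ∈ rest, x ≠ -1) :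
    (h :: rest).foldl pvStep (-1) = rest.foldl min h := by
  rw [List.foldl_cons, show pvStep (-1) h = h by unfold pvStep; simp]
  exact foldA_min rest h hh hr

-- under ¬D, A's fold computes a pvIsRef value
lemma funcTwins_isRef (xs : List Int) (hD : ¬ D_funcTwins xs) : pvIsRef xs (funcTwins xs) := by
  rw [funcTwins_eq_foldA]
  by_cases h1 : xs.count (-1) = 1
  · by_cases h2 : ∃ x ∈ xs, xs.count x = 1 ∧ x < -1
    · -- some singleton is < -1: the sentinel is never clobbered harmfully, result is the min
      obtain ⟨x0, hx0m, hx0c, hx0lt⟩ := h2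
      have hx0s : x0 ∈ pvSing xs := mem_pvSing.mpr ⟨hx0m, hx0c⟩
      obtain ⟨h, rest, hsplit⟩ := List.exists_cons_of_ne_nil (List.ne_nil_of_mem hx0s)
      set m := rest.foldl min h with hm
      have hmle : m ≤ h ∧ ∀ y ∈ rest, m ≤ y := PySem.List.foldl_min_le rest h
      have hmmem : m ∈ pvSing xs := by
        rw [hsplit]
        rcases PySem.List.foldl_min_mem rest h with he | he
        · exact he ▸ List.mem_cons_self
        · exact List.mem_cons_of_mem _ he
      have hmin : ∀ y ∈ pvSing xs, m ≤ y := by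
        intro y hy
        rw [hsplit] at hy
        rcases List.mem_cons.mp hy with rfl | hy'
        · exact hmle.1
        · exact hmle.2 y hy'
      have hmlt : m < -1 := lt_of_le_of_lt (hmin x0 hx0s) hx0lt
      -- split the singleton list at (one occurrence of) m
      obtain ⟨u, v, huv⟩ := List.append_of_mem hmmem
      have humem : ∀ y ∈ u, y ∈ pvSing xs := fun y hy =>
        huv ▸ List.mem_append.mpr (Or.inl hy)
      have hvmem : ∀ y ∈ v, y ∈ pvSing xs := fun y hy =>
        huv ▸ List.mem_append.mpr (Or.inr (List.mem_cons_of_mem _ hy))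
      have hout : (pvSing xs).foldl pvStep (-1) = m := by
        rw [huv, List.foldl_append, List.foldl_cons]
        have hstep : pvStep (u.foldl pvStep (-1)) m = m := by
          rcases foldA_mem u (-1) with he | he
          · exact pvStep_eq_of (Or.inl he)
          · exact pvStep_eq_of (Or.inr (hmin _ (humem _ he)))
        rw [hstep]
        exact foldA_stay v m (by omega) (fun y hy => hmin y (hvmem y hy))
      rw [hout]
      exact Or.inr ⟨(mem_pvSing.mp hmmem).2, fun y hym hyc => hmin y (mem_pvSing.mpr ⟨hym, hyc⟩)⟩
    · -- -1 is a singleton, all singletons ≥ -1, and (¬D) none occurs after the -1: result is -1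
      push Not at h2
      have hC2 : ∀ x ∈ xs, xs.count x = 1 → -1 ≤ x := fun x hm hc => (h2 x hm hc)
      obtain ⟨u, v, hsplit, hu1, hv1, hu2, hv2, hdropn, hiff⟩ := pvSing_split h1
      have hv : v = [] := by
        by_contra hne
        obtain ⟨x, hxd, hxc⟩ := hiff.mp hne
        exact hD ⟨h1, hC2, ⟨x, hxd, hxc, by
          have hx1 : x ≠ -1 := fun he => hdropn (he ▸ hxd)
          have := hC2 x (List.mem_of_mem_drop hxd) hxc
          omega⟩⟩
      have hout : (pvSing xs).foldl pvStep (-1) = -1 := by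
        rw [hsplit, hv, List.foldl_append, List.foldl_cons, List.foldl_nil]
        rcases foldA_mem u (-1) with he | he
        · exact pvStep_eq_of (Or.inl he)
        · exact pvStep_eq_of (Or.inr (hC2 _ (hu2 _ he).1 (hu2 _ he).2))
      rw [hout]
      exact Or.inr ⟨h1, hC2⟩
  · -- -1 is not a singleton: the sentinel is never produced by a real element
    have hs1 : ∀ x ∈ pvSing xs, x ≠ -1 := by
      intro x hx he
      exact h1 (he ▸ (mem_pvSing.mp hx).2)
    cases hps : pvSing xs with
    | nil =>
        refine Or.inl ⟨?_, rfl⟩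
        intro x hxm hxc
        exact (List.ne_nil_of_mem (mem_pvSing.mpr ⟨hxm, hxc⟩ : x ∈ pvSing xs)) hps
    | cons h rest =>
        have hh : h ≠ -1 := hs1 h (hps ▸ List.mem_cons_self)
        have hr : ∀ x ∈ rest, x ≠ -1 := fun x hx =>
          hs1 x (hps ▸ List.mem_cons_of_mem _ hx)
        rw [foldA_cons_min hh hr]
        set m := rest.foldl min h with hm
        have hmle := PySem.List.foldl_min_le rest h
        have hmmem : m ∈ pvSing xs := by
          rw [hps]
          rcases PySem.List.foldl_min_mem rest h with he | he
          · exact he ▸ List.mem_cons_self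
          · exact List.mem_cons_of_mem _ he
        refine Or.inr ⟨(mem_pvSing.mp hmmem).2, ?_⟩
        intro y hym hyc
        have : y ∈ pvSing xs := mem_pvSing.mpr ⟨hym, hyc⟩
        rw [hps] at this
        rcases List.mem_cons.mp this with rfl | hy'
        · exact hmle.1
        · exact hmle.2 y hy'

lemma funcTwins_gt_of_D (xs : List Int) (hD : D_funcTwins xs) : -1 < funcTwins xs := by
  obtain ⟨h1, hC2, x0, hx0d, hx0c, hx0gt⟩ := hD
  rw [funcTwins_eq_foldA]
  obtain ⟨u, v, hsplit, hu1, hv1, hu2, hv2, hdropn, hiff⟩ := pvSing_split h1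
  have hvne : v ≠ [] := hiff.mpr ⟨x0, hx0d, hx0c⟩
  have hvgt : ∀ y ∈ v, -1 < y := by
    intro y hy
    have := hC2 y (hv2 y hy).1 (hv2 y hy).2
    have : y ≠ -1 := fun he => hv1 (he ▸ hy)
    omega
  have hout : (pvSing xs).foldl pvStep (-1) = v.foldl pvStep (-1) := by
    rw [hsplit, List.foldl_append, List.foldl_cons]
    congr 1
    rcases foldA_mem u (-1) with he | he
    · exact pvStep_eq_of (Or.inl he)
    · exact pvStep_eq_of (Or.inr (hC2 _ (hu2 _ he).1 (hu2 _ he).2))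
  rw [hout]
  obtain ⟨h, rest, hvsplit⟩ := List.exists_cons_of_ne_nil hvne
  have hh : h ≠ -1 := fun he => hv1 (he ▸ hvsplit ▸ List.mem_cons_self)
  have hr : ∀ x ∈ rest, x ≠ -1 := fun x hx he =>
    hv1 (he ▸ hvsplit ▸ List.mem_cons_of_mem _ hx)
  rw [hvsplit, foldA_cons_min hh hr]
  rcases PySem.List.foldl_min_mem rest h with he | he
  · rw [he]; exact hvgt h (hvsplit ▸ List.mem_cons_self)
  · exact hvgt _ (hvsplit ▸ List.mem_cons_of_mem _ he)

-- ===== VERDICT (by name: the statement is the Claim_ definition above) =====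
theorem funcTwins_spec : Claim_unchanged_funcTwins := by
  intro xs _ hD
  exact pvIsRef_unique (funcTwins_isRef xs hD) (funcTwins_alt_isRef xs)

theorem funcTwins_changed : Claim_changed_funcTwins := by
  unfold Claim_changed_funcTwins; decide

theorem funcTwins_tight : Claim_exact_funcTwins := by
  intro xs _ hD heq
  have hB : funcTwins_alt xs = -1 := by
    refine pvIsRef_unique (funcTwins_alt_isRef xs) (Or.inr ⟨hD.1, fun x hx hc => hD.2.1 x hx hc⟩)
  have := funcTwins_gt_of_D xs hD
  omega
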